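-- pv_equiv track=rewrite | github.com/monglepick/monglepick-agent | src/monglepick/data_pipeline/preprocessor.py | extract_cast_names
-- ===== SOURCE A (Python) =====
-- def extract_cast_names(credits: dict, top_n: int = 5) -> list[str]:
--     """
--     credits.cast에서 상위 N명의 name + original_name을 모두 추출한다.
--
--     Phase ML-2: 한글 이름과 영문 이름을 모두 포함하여
--     "톰 크루즈" 또는 "Tom Cruise" 어느 쪽으로 검색해도 매칭되도록 한다.
--
--     Returns:
--         중복 제거된 이름 리스트 (최대 top_n*2개)
--         예: ["톰 크루즈", "Tom Cruise", "마일스 텔러", "Miles Teller", ...]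
--     """
--     cast = credits.get("cast", [])
--     result: list[str] = []
--     seen: set[str] = set()
--
--     for person in cast[:top_n]:
--         name = person.get("name", "")
--         original_name = person.get("original_name", "")
--
--         if name and name not in seen:
--             result.append(name)
--             seen.add(name)
--         # original_name이 name과 다르면 추가 (한/영 이중 저장)
--         if original_name and original_name != name and original_name not in seen:
--             result.append(original_name)
--             seen.add(original_name)
--
--     return result
-- ===== SOURCE B (Python) =====
-- def extract_cast_names(credits: dict, top_n: int = 5) -> list[str]:
--     """Recursive back-to-front: each person's own unique truthy names form a head
--     block; the recursively built suffix is filtered against that block (no seen-set)."""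
--     def go(people):
--         if not people:
--             return []
--         head = []
--         for key in ("name", "original_name"):
--             v = people[0].get(key, "")
--             if v and v not in head:
--                 head.append(v)
--         return head + [x for x in go(people[1:]) if x not in head]
--     return go(credits.get("cast", [])[:top_n])
-- ===== Notes on version B (the rewrite author's own statement) =====
-- stated objective: alternative
-- what changed: B replaces A's forward loop with mutable result/seen-set state by a recursion on the cast list: each person's own unique truthy names form a head block and the recursively built suffix list is filtered against that block, so no seen set exists at all.
import Mathlib
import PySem

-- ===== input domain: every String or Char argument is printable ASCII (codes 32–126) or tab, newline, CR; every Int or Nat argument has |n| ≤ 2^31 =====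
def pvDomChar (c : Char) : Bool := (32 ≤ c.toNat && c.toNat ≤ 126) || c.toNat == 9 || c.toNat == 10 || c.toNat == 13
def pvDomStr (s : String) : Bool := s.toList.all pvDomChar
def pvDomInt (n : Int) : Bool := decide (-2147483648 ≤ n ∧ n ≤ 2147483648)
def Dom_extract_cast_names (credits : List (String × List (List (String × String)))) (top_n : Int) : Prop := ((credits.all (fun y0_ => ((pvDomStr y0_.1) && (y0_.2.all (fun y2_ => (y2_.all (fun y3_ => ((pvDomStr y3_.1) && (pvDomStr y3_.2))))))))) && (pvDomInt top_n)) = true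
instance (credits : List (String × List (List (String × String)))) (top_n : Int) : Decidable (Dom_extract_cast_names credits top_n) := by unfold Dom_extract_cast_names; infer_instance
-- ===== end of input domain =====

-- B rebuilds the result by recursion on the cast list (head block + filtered suffix),
-- with no seen-set; an alternative decomposition, not faster.

-- ===== PORT A =====
-- loop body of A: one person updates (result, seen)
def pvCastStepA (st : List String × PySem.Set String) (person : List (String × String)) :
    List String × PySem.Set String :=
  let name := (PySem.Dict.mk person).getD "name" ""
  let original_name := (PySem.Dict.mk person).getD "original_name" ""
  let st1 :=
    if name ≠ "" ∧ ¬ (PySem.Set.contains st.2 name = true) then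
      (st.1 ++ [name], PySem.Set.add st.2 name)
    else st
  if original_name ≠ "" ∧ original_name ≠ name ∧ ¬ (PySem.Set.contains st1.2 original_name = true) then
    (st1.1 ++ [original_name], PySem.Set.add st1.2 original_name)
  else st1

def extract_cast_names (credits : List (String × List (List (String × String)))) (top_n : Int) : List String :=
  let cast := (PySem.Dict.mk credits).getD "cast" []
  ((PySem.List.slice cast none (some top_n)).foldl pvCastStepA ([], PySem.Set.empty)).1

-- ===== PORT B =====
-- head block of B: one person's unique truthy names, in key order
def pvHeadOf (person : List (String × String)) : List String :=
  (["name", "original_name"]).foldl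
    (fun head key =>
      let v := (PySem.Dict.mk person).getD key ""
      if v ≠ "" ∧ v ∉ head then head ++ [v] else head) []

-- recursion of B: head block ++ suffix filtered against it
def pvGo : List (List (String × String)) → List String
  | [] => []
  | p :: rest =>
    let head := pvHeadOf p
    head ++ (pvGo rest).filter (fun x => decide (x ∉ head))

def extract_cast_names_alt (credits : List (String × List (List (String × String)))) (top_n : Int) : List String :=
  let cast := (PySem.Dict.mk credits).getD "cast" []
  pvGo (PySem.List.slice cast none (some top_n))

-- ===== PRECONDITION & SPEC =====
def Spec_extract_cast_names (credits : List (String × List (List (String × String)))) (top_n : Int) (out : List String) : Prop := out = extract_cast_names_alt credits top_n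
instance (credits : List (String × List (List (String × String)))) (top_n : Int) (out : List String) : Decidable (Spec_extract_cast_names credits top_n out) := by unfold Spec_extract_cast_names; infer_instance

-- ===== CLAIM (what is proved, stated in full; the proofs are below) =====
def Claim_equal_extract_cast_names : Prop := ∀ (credits : List (String × List (List (String × String)))) (top_n : Int), Dom_extract_cast_names credits top_n → Spec_extract_cast_names credits top_n (extract_cast_names credits top_n)

-- ===== LEMMAS AND PROOFS =====

-- candidate strings contributed by one person (the two truthy values, in order)
def pvCandOf (person : List (String × String)) : List String :=
  (if (PySem.Dict.mk person).getD "name" "" ≠ "" then [(PySem.Dict.mk person).getD "name" ""] else []) ++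
  (if (PySem.Dict.mk person).getD "original_name" "" ≠ "" then [(PySem.Dict.mk person).getD "original_name" ""] else [])

-- A's fold over one person is folding Set.add over its candidates (when result = seen)
theorem pvStepA_eq (s : PySem.Set String) (p : List (String × String)) :
    pvCastStepA (s, s) p =
      ((pvCandOf p).foldl PySem.Set.add s, (pvCandOf p).foldl PySem.Set.add s) := by
  simp only [pvCastStepA, pvCandOf]
  generalize (PySem.Dict.mk p).getD "name" "" = n
  generalize (PySem.Dict.mk p).getD "original_name" "" = o
  by_cases hn : n = "" <;> by_cases ho : o = "" <;> by_cases he : o = n <;>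
    by_cases hcn : n ∈ s <;> by_cases hco : o ∈ s <;>
    simp_all [PySem.Set.add]

theorem pvLoopA_eq (l : List (List (String × String))) (s : PySem.Set String) :
    (l.foldl pvCastStepA (s, s)).1 = (l.flatMap pvCandOf).foldl PySem.Set.add s := by
  induction l generalizing s with
  | nil => simp
  | cons p l ih => simp [List.foldl, pvStepA_eq, ih, List.foldl_append]

-- folding Set.add appends the not-yet-present elements, in dedup order
theorem pvFoldAdd_eq (b : List String) (s : List String) :
    b.foldl PySem.Set.add s = s ++ (PySem.Set.ofList b).filter (fun x => decide (x ∉ s)) := by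
  induction b generalizing s with
  | nil => simp
  | cons x b ih =>
    have hx : PySem.Set.ofList (x :: b)
        = [x] ++ (PySem.Set.ofList b).filter (fun y => decide (y ∉ ([x] : List String))) := by
      have := ih [x]
      simpa [PySem.Set.ofList_eq_foldl, PySem.Set.add] using this
    simp only [List.foldl, hx, ih (PySem.Set.add s x)]
    by_cases hmem : x ∈ s
    · have hadd : PySem.Set.add s x = s := by simp [PySem.Set.add, hmem]
      rw [hadd]
      simp only [List.filter_append, List.filter_filter]
      have h1 : List.filter (fun x_1 => decide (x_1 ∉ s)) [x] = [] := by
        simp [List.filter, hmem]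
      have h2 : ∀ y : String,
          (decide (y ∉ s) && decide (y ∉ ([x] : List String))) = decide (y ∉ s) := by
        intro y
        by_cases hy : y ∈ s
        · simp [hy]
        · have : y ≠ x := by rintro rfl; exact hy hmem
          simp [hy, this]
      rw [h1, List.filter_congr (fun y _ => h2 y)]
      simp
    · have hadd : PySem.Set.add s x = s ++ [x] := by simp [PySem.Set.add, hmem]
      rw [hadd]
      simp only [List.filter_append, List.filter_filter, List.append_assoc]
      have h1 : List.filter (fun x_1 => decide (x_1 ∉ s)) [x] = [x] := by
        simp [List.filter, hmem]
      have h2 : ∀ y : String,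
          decide (y ∉ s ++ [x]) = (decide (y ∉ s) && decide (y ∉ ([x] : List String))) := by
        intro y
        by_cases hy : y ∈ s <;> by_cases hyx : y = x <;> simp [hy, hyx]
      rw [h1, List.filter_congr (fun y _ => h2 y)]

theorem pvOfList_append (a b : List String) :
    PySem.Set.ofList (a ++ b)
      = PySem.Set.ofList a
        ++ (PySem.Set.ofList b).filter (fun x => decide (x ∉ PySem.Set.ofList a)) := by
  rw [PySem.Set.ofList_eq_foldl, List.foldl_append, ← PySem.Set.ofList_eq_foldl, pvFoldAdd_eq]

-- B's head block is the deduped candidate list of one person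
theorem pvHeadOf_eq (p : List (String × String)) :
    pvHeadOf p = PySem.Set.ofList (pvCandOf p) := by
  simp only [pvHeadOf, pvCandOf, List.foldl]
  generalize (PySem.Dict.mk p).getD "name" "" = n
  generalize (PySem.Dict.mk p).getD "original_name" "" = o
  by_cases hn : n = "" <;> by_cases ho : o = "" <;> by_cases he : o = n <;>
    simp_all [PySem.Set.ofList, PySem.Set.add]

-- B's recursion computes the deduped flat candidate list
theorem pvGo_eq (l : List (List (String × String))) :
    pvGo l = PySem.Set.ofList (l.flatMap pvCandOf) := by
  induction l with
  | nil => simp [pvGo, PySem.Set.ofList]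
  | cons p rest ih =>
    simp only [pvGo, pvHeadOf_eq, ih, List.flatMap_cons, pvOfList_append]

-- ===== VERDICT (by name: the statement is the Claim_ definition above) =====
theorem extract_cast_names_spec : Claim_equal_extract_cast_names := by
  intro credits top_n _
  show extract_cast_names credits top_n = extract_cast_names_alt credits top_n
  simp only [extract_cast_names, extract_cast_names_alt]
  have h0 : (PySem.Set.empty : PySem.Set String) = ([] : List String) := rfl
  rw [h0, pvLoopA_eq, pvGo_eq, PySem.Set.ofList_eq_foldl]
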